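-- pv_equiv track=rewrite | github.com/YangHai-1218/leetcode_record | exams/xiaohongshu.py | youxu_array
-- ===== SOURCE A (Python) =====
-- def youxu_array(nums, mask):
--     new_nums = []
--     for n, m in zip(nums, mask):
--         if not m:
--             new_nums.append(n)
--     for i in range(len(new_nums)-1):
--         if new_nums[i] > new_nums[i+1]:
--             return False
--     return True
-- ===== SOURCE B (Python) =====
-- def youxu_array(nums, mask):
--     prev = None
--     for n, m in zip(nums, mask):
--         if m:
--             continue
--         if prev is not None and prev > n:
--             return False
--         prev = n
--     return True
-- ===== Notes on version B (the rewrite author's own statement) =====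
-- stated objective: simpler
-- what changed: Single pass over zip(nums, mask) keeping only the previous unmasked value (None sentinel), instead of building an intermediate filtered list and then index-scanning it in a second loop.
import Mathlib
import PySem

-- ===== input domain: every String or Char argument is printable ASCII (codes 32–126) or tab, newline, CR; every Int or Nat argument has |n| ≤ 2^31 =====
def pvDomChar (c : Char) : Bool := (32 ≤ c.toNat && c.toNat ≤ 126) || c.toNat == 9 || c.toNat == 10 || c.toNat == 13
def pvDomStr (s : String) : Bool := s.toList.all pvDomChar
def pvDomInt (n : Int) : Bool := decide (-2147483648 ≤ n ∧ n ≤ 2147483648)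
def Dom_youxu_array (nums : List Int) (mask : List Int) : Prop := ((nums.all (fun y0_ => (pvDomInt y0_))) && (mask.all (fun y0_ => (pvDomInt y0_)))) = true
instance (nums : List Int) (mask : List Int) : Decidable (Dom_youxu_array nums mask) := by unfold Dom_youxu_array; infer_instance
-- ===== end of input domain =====

-- B replaces A's build-filtered-list-then-index-scan with one pass over zip keeping only the previous unmasked value (simpler, O(1) extra space).

-- ===== PORT A =====
def youxu_array (nums : List Int) (mask : List Int) : Bool :=
  -- new_nums = []; for n, m in zip(nums, mask): if not m: new_nums.append(n)
  let new_nums := (nums.zip mask).foldl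
    (fun acc (p : Int × Int) => if p.2 == 0 then acc ++ [p.1] else acc) []
  -- for i in range(len(new_nums)-1): if new_nums[i] > new_nums[i+1]: return False
  (PySem.List.pyRange 0 ((new_nums.length : Int) - 1) 1).all
    (fun i => !decide (PySem.List.pyGetD new_nums i 0 > PySem.List.pyGetD new_nums (i + 1) 0))

-- ===== PORT B =====
-- the loop of Source B: prev carries the last unmasked value (none = Python's None)
def youxuAltGo (prev : Option Int) : List (Int × Int) → Bool
  | [] => true
  | (n, m) :: rest =>
    if m ≠ 0 then youxuAltGo prev rest
    else if (match prev with | some p => decide (p > n) | none => false) then false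
    else youxuAltGo (some n) rest

def youxu_array_alt (nums : List Int) (mask : List Int) : Bool :=
  youxuAltGo none (nums.zip mask)

-- ===== PRECONDITION & SPEC =====
def Spec_youxu_array (nums : List Int) (mask : List Int) (out : Bool) : Prop := out = youxu_array_alt nums mask
instance (nums : List Int) (mask : List Int) (out : Bool) : Decidable (Spec_youxu_array nums mask out) := by unfold Spec_youxu_array; infer_instance

-- ===== CLAIM (what is proved, stated in full; the proofs are below) =====
def Claim_equal_youxu_array : Prop := ∀ (nums : List Int) (mask : List Int), Dom_youxu_array nums mask → Spec_youxu_array nums mask (youxu_array nums mask)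

-- ===== LEMMAS AND PROOFS =====

/-- the filtered list A builds -/
def youxuF (l : List (Int × Int)) : List Int := (l.filter (fun p => p.2 == 0)).map Prod.fst

/-- adjacent non-decrease check -/
def youxuChk : List Int → Bool
  | a :: b :: t => decide (a ≤ b) && youxuChk (b :: t)
  | _ => true

lemma youxuF_fold (l : List (Int × Int)) (acc : List Int) :
    l.foldl (fun acc (p : Int × Int) => if p.2 == 0 then acc ++ [p.1] else acc) acc
      = acc ++ youxuF l := by
  induction l generalizing acc with
  | nil => simp [youxuF]
  | cons p t ih =>
    by_cases h : p.2 = 0 <;> simp [youxuF, h] at * <;> simp [ih]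

lemma youxuChk_iff (l : List Int) :
    youxuChk l = true ↔ List.IsChain (· ≤ ·) l := by
  induction l using youxuChk.induct with
  | case1 a b t ih => simp [youxuChk, ih, List.isChain_cons_cons]
  | case2 l h => cases l with
    | nil => simp [youxuChk]
    | cons a t => cases t with
      | nil => simp [youxuChk]
      | cons b t' => exact absurd rfl (h a b t')

lemma youxu_scanA (l : List Int) :
    ((PySem.List.pyRange 0 ((l.length : Int) - 1) 1).all
      (fun i => !decide (PySem.List.pyGetD l i 0 > PySem.List.pyGetD l (i + 1) 0)))
    = youxuChk l := by
  rw [Bool.eq_iff_iff, youxuChk_iff, List.isChain_iff_getElem]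
  simp only [List.all_eq_true, PySem.List.mem_pyRange_one,
    Bool.not_eq_eq_eq_not, Bool.not_true, decide_eq_false_iff_not, not_lt]
  constructor
  · intro h i hi
    have hh := h (i : Int) ⟨Int.natCast_nonneg i, by omega⟩
    rw [show ((i : Int) + 1) = ((i + 1 : Nat) : Int) by push_cast; ring] at hh
    simp only [PySem.List.pyGetD_natCast] at hh
    rwa [List.getD_eq_getElem _ _ (by omega), List.getD_eq_getElem _ _ (by omega)] at hh
  · intro h i hi
    obtain ⟨h0, h1⟩ := hi
    have hk : i = ((i.toNat : Nat) : Int) := by omega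
    rw [hk, show ((i.toNat : Nat) : Int) + 1 = ((i.toNat + 1 : Nat) : Int) by push_cast; ring]
    simp only [PySem.List.pyGetD_natCast]
    rw [List.getD_eq_getElem _ _ (by omega), List.getD_eq_getElem _ _ (by omega)]
    exact h i.toNat (by omega)

lemma youxuAltGo_eq (l : List (Int × Int)) :
    ∀ prev : Option Int,
      youxuAltGo prev l = youxuChk ((prev.elim [] (fun p => [p])) ++ youxuF l) := by
  induction l with
  | nil => intro prev; cases prev <;> simp [youxuAltGo, youxuF, youxuChk]
  | cons p t ih =>
    intro prev
    obtain ⟨n, m⟩ := p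
    by_cases hm : m = 0
    · cases prev with
      | none =>
        simp [youxuAltGo, hm, youxuF, ih (some n)]
      | some q =>
        by_cases hqn : q > n
        · simp [youxuAltGo, hm, hqn, youxuF, youxuChk,
            show ¬ q ≤ n by omega]
        · simp [youxuAltGo, hm, hqn, youxuF, ih (some n), youxuChk,
            show q ≤ n by omega]
    · cases prev <;>
        simp [youxuAltGo, hm, youxuF, ih, youxuF]

-- ===== VERDICT (by name: the statement is the Claim_ definition above) =====
theorem youxu_array_spec : Claim_equal_youxu_array := by
  intro nums mask _
  unfold Spec_youxu_array youxu_array youxu_array_alt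
  rw [youxuF_fold, youxu_scanA, youxuAltGo_eq]
  simp
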